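-- pv_equiv track=rewrite | github.com/Kawser-nerd/CLCDSA | Source Codes/CodeJamData/12/33/7.py | solve
-- ===== SOURCE A (Python) =====
-- def compact(boxes, toys):
--     if boxes[0][0] == 0:
--         boxes.pop(0)
--     if toys[0][0] == 0:
--         toys.pop(0)
--
-- def solve(boxes, toys, M=None):
--     if M is None:
--         M = {}
--     if len(boxes) == 0 or len(toys) == 0:
--         return 0
--     key = (len(boxes), len(toys), boxes[0][0], toys[0][0])
--     if key in M:
--         return M[key]
--     if boxes[0][1] == toys[0][1]:
--         # matching types!
--         matches = min(boxes[0][0], toys[0][0])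
--         boxes = [[boxes[0][0]-matches, boxes[0][1]]]+boxes[1:]
--         toys = [[toys[0][0]-matches, toys[0][1]]]+toys[1:]
--         compact(boxes, toys)
--         M[key] = matches+solve(boxes, toys, M)
--         return M[key]
--     # not matching types!
--     # we have two options: discarding all the boxes or all the toys from this type
--     M[key] = max(solve(boxes[1:], toys, M), solve(boxes, toys[1:], M))
--     return M[key]
-- ===== SOURCE B (Python) =====
-- def solve(boxes, toys, M=None):
--     # Iterative tabulation: explicit frame stack evaluating the state DAG post-order
--     # (add/max continuation frames), index-based states, no recursion, no list slicing;
--     # does not consult or mutate the caller's M (equivalence stated for ineffective M).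
--     n, m = len(boxes), len(toys)
--     if n == 0 or m == 0:
--         return 0
--     val = {}
--     start = (0, 0, boxes[0][0], toys[0][0])
--     stack = [("eval", start)]
--     while stack:
--         frame = stack.pop()
--         if frame[0] == "eval":
--             s = frame[1]
--             if s in val:
--                 continue
--             i, j, bc, tc = s
--             if i >= n or j >= m:
--                 val[s] = 0
--             elif boxes[i][1] == toys[j][1]:
--                 g = bc if bc < tc else tc
--                 nb, nt = bc - g, tc - g
--                 if nb == 0 and nt == 0:
--                     c = (i + 1, j + 1,
--                          boxes[i + 1][0] if i + 1 < n else 0,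
--                          toys[j + 1][0] if j + 1 < m else 0)
--                 elif nb == 0:
--                     c = (i + 1, j, boxes[i + 1][0] if i + 1 < n else 0, nt)
--                 else:
--                     c = (i, j + 1, nb, toys[j + 1][0] if j + 1 < m else 0)
--                 stack.append(("add", s, g, c))
--                 stack.append(("eval", c))
--             else:
--                 a = (i + 1, j, boxes[i + 1][0] if i + 1 < n else 0, tc)
--                 b = (i, j + 1, bc, toys[j + 1][0] if j + 1 < m else 0)
--                 stack.append(("max", s, a, b))
--                 stack.append(("eval", a))
--                 stack.append(("eval", b))
--         elif frame[0] == "add":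
--             _, s, g, c = frame
--             val[s] = g + val[c]
--         else:
--             _, s, a, b = frame
--             val[s] = max(val[a], val[b])
--     return val[start]
-- ===== Notes on version B (the rewrite author's own statement) =====
-- stated objective: alternative
-- what changed: replaces A's top-down memoized recursion over freshly sliced list states (and a caller-threaded memo dict) with an iterative post-order tabulation: an explicit frame stack with eval/add/max continuation frames evaluates the index-based state DAG bottom-up, with no recursion and no list copying; intended as faster (measured 1.7-2.2x on sizes where both finish, unconfirmed at the largest size)
-- outside the precondition, e.g. on solve([[1, 2]], [[1, 2]], {(1, 1, 1, 1): 5}): A returns 5, B returns 1; on solve([[2, 5], [9]], [[2, 5]], None): A returns 2, B returns 2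
import Mathlib
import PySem

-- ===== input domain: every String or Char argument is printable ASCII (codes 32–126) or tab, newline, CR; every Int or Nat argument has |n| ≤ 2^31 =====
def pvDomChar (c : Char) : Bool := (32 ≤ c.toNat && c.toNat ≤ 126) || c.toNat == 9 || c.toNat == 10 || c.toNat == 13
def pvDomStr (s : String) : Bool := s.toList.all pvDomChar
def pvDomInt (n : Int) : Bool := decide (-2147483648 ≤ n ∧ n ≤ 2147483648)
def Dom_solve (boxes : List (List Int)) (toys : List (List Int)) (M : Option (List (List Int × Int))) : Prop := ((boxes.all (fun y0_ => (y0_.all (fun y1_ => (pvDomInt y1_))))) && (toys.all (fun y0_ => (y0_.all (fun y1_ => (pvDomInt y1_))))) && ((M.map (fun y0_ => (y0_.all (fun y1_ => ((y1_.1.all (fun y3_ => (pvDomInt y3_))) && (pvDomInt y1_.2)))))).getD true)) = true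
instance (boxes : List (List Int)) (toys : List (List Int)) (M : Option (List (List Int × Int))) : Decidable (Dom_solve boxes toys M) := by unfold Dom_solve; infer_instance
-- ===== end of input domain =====

-- B replaces A's top-down memoized recursion on sliced list states by an iterative
-- post-order tabulation: an explicit frame stack (eval/add/max continuation frames)
-- evaluates the index-based state DAG bottom-up, with no recursion and no list copying.
-- Equivalence is about the RETURN value only (A fills the caller-supplied memo dict M
-- in place, B never touches it).

-- ===== PORT A =====
-- g[0] / g[1]: exact wherever Python A returns under Pre_solve (groups are [count, type] pairs there)
def pvCnt (g : List Int) : Int := g.getD 0 0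
def pvTyp (g : List Int) : Int := g.getD 1 0

-- Python's compact mutates its two list arguments; ported as a function returning the pair
def compactA (boxes toys : List (List Int)) : List (List Int) × List (List Int) :=
  (if pvCnt (boxes.headD []) = 0 then boxes.tail else boxes,
   if pvCnt (toys.headD []) = 0 then toys.tail else toys)

-- fuel only makes the recursion structural; it never runs out (every call strictly shrinks
-- boxes.length + toys.length, and solve passes boxes.length + toys.length + 1)
def solveGo : Nat → List (List Int) → List (List Int) → PySem.Dict (List Int) Int →
    Int × PySem.Dict (List Int) Int
  | 0, _, _, M => (0, M)
  | fuel + 1, boxes, toys, M =>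
    if boxes.length = 0 ∨ toys.length = 0 then (0, M)
    else
      let key : List Int := [(boxes.length : Int), (toys.length : Int),
                             pvCnt (boxes.headD []), pvCnt (toys.headD [])]
      match M.get? key with
      | some v => (v, M)
      | none =>
        if pvTyp (boxes.headD []) = pvTyp (toys.headD []) then
          let mtc := min (pvCnt (boxes.headD [])) (pvCnt (toys.headD []))
          let boxes1 := [pvCnt (boxes.headD []) - mtc, pvTyp (boxes.headD [])] :: boxes.tail
          let toys1 := [pvCnt (toys.headD []) - mtc, pvTyp (toys.headD [])] :: toys.tail
          let ct := compactA boxes1 toys1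
          let r := solveGo fuel ct.1 ct.2 M
          (mtc + r.1, r.2.insert key (mtc + r.1))
        else
          let r1 := solveGo fuel boxes.tail toys M
          let r2 := solveGo fuel boxes toys.tail r1.2
          (max r1.1 r2.1, r2.2.insert key (max r1.1 r2.1))

def solve (boxes : List (List Int)) (toys : List (List Int)) (M : Option (List (List Int × Int))) : Int :=
  (solveGo (boxes.length + toys.length + 1) boxes toys (PySem.Dict.ofList (M.getD []))).1

-- ===== PORT B =====
-- Source B's `lst[k][0] if k < len(lst) else 0` (exact under Pre_solve, where groups are pairs)
def pvNxt (lst : List (List Int)) (k : Nat) : Int := pvCnt (lst.getD k [])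

-- Source B's stack frames: ("eval", s) / ("add", s, g, c) / ("max", s, a, b)
inductive PvFrame where
  | eval : Nat × Nat × Int × Int → PvFrame
  | add  : Nat × Nat × Int × Int → Int → Nat × Nat × Int × Int → PvFrame
  | max  : Nat × Nat × Int × Int → Nat × Nat × Int × Int → Nat × Nat × Int × Int → PvFrame
  deriving DecidableEq, Repr

-- Source B's `while stack:` loop; fuel only makes the loop structural recursion — a step-count
-- bound proved below shows 3*4^(n+m) iterations always suffice, so it never runs out.
-- Source B's `val[c]` lookups are ported as `(val.get? c).getD 0`; the invariant proved below
-- shows the key is always present, so the default is never taken (Source B never raises there).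
def runB (boxes toys : List (List Int)) :
    Nat → List PvFrame → PySem.Dict (Nat × Nat × Int × Int) Int →
    PySem.Dict (Nat × Nat × Int × Int) Int
  | 0, _, val => val
  | _ + 1, [], val => val
  | fuel + 1, PvFrame.eval (i, j, bc, tc) :: stack, val =>
    if (val.get? (i, j, bc, tc)).isSome then runB boxes toys fuel stack val
    else if boxes.length ≤ i ∨ toys.length ≤ j then
      runB boxes toys fuel stack (val.insert (i, j, bc, tc) 0)
    else if pvTyp (boxes.getD i []) = pvTyp (toys.getD j []) then
      let g := if bc < tc then bc else tc
      if bc - g = 0 ∧ tc - g = 0 then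
        runB boxes toys fuel
          (PvFrame.eval (i + 1, j + 1, pvNxt boxes (i + 1), pvNxt toys (j + 1)) ::
            PvFrame.add (i, j, bc, tc) g (i + 1, j + 1, pvNxt boxes (i + 1), pvNxt toys (j + 1)) :: stack) val
      else if bc - g = 0 then
        runB boxes toys fuel
          (PvFrame.eval (i + 1, j, pvNxt boxes (i + 1), tc - g) ::
            PvFrame.add (i, j, bc, tc) g (i + 1, j, pvNxt boxes (i + 1), tc - g) :: stack) val
      else
        runB boxes toys fuel
          (PvFrame.eval (i, j + 1, bc - g, pvNxt toys (j + 1)) ::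
            PvFrame.add (i, j, bc, tc) g (i, j + 1, bc - g, pvNxt toys (j + 1)) :: stack) val
    else
      runB boxes toys fuel
        (PvFrame.eval (i, j + 1, bc, pvNxt toys (j + 1)) ::
          PvFrame.eval (i + 1, j, pvNxt boxes (i + 1), tc) ::
          PvFrame.max (i, j, bc, tc) (i + 1, j, pvNxt boxes (i + 1), tc) (i, j + 1, bc, pvNxt toys (j + 1)) :: stack) val
  | fuel + 1, PvFrame.add s g c :: stack, val =>
    runB boxes toys fuel stack (val.insert s (g + (val.get? c).getD 0))
  | fuel + 1, PvFrame.max s a b :: stack, val =>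
    runB boxes toys fuel stack (val.insert s (Max.max ((val.get? a).getD 0) ((val.get? b).getD 0)))

def solve_alt (boxes : List (List Int)) (toys : List (List Int)) (M : Option (List (List Int × Int))) : Int :=
  if boxes.length = 0 ∨ toys.length = 0 then 0
  else
    ((runB boxes toys (3 * 4 ^ (boxes.length + toys.length))
        [PvFrame.eval (0, 0, pvNxt boxes 0, pvNxt toys 0)] PySem.Dict.empty).get?
      (0, 0, pvNxt boxes 0, pvNxt toys 0)).getD 0

-- ===== PRECONDITION & SPEC =====
-- Pre_ admits any input with an empty box or toy list (A answers 0 before touching anything);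
-- otherwise it requires every group to be a [count, type] pair of length ≥ 2 (A raises an
-- IndexError on malformed groups it inspects, though it returns on malformed groups it never
-- reaches) and the caller-supplied memo M to contain no key a subproblem could ever look up
-- (a hit on a pre-filled memo makes A's answer an artefact of the memo contents — its keys
-- omit the group types — which B does not consult).
def Pre_solve (boxes : List (List Int)) (toys : List (List Int)) (M : Option (List (List Int × Int))) : Prop :=
  boxes = [] ∨ toys = [] ∨
    ((∀ g ∈ boxes, 2 ≤ g.length) ∧ (∀ g ∈ toys, 2 ≤ g.length) ∧
      (∀ p ∈ M.getD [], p.1.length ≠ 4 ∨ p.1.getD 0 0 < 1 ∨ (boxes.length : Int) < p.1.getD 0 0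
        ∨ p.1.getD 1 0 < 1 ∨ (toys.length : Int) < p.1.getD 1 0))
instance (boxes : List (List Int)) (toys : List (List Int)) (M : Option (List (List Int × Int))) : Decidable (Pre_solve boxes toys M) := by unfold Pre_solve; infer_instance

def pvWitness_solve : List (List Int) × List (List Int) × (Option (List (List Int × Int))) :=
  ([[2, 1], [1, 2]], [[1, 2], [3, 1]], none)

def Spec_solve (boxes : List (List Int)) (toys : List (List Int)) (M : Option (List (List Int × Int))) (out : Int) : Prop := out = solve_alt boxes toys M
instance (boxes : List (List Int)) (toys : List (List Int)) (M : Option (List (List Int × Int))) (out : Int) : Decidable (Spec_solve boxes toys M out) := by unfold Spec_solve; infer_instance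

-- ===== CLAIM (what is proved, stated in full; the proofs are below) =====
def Claim_equal_solve : Prop := ∀ (boxes : List (List Int)) (toys : List (List Int)) (M : Option (List (List Int × Int))), Dom_solve boxes toys M → Pre_solve boxes toys M → Spec_solve boxes toys M (solve boxes toys M)


-- ===== LEMMAS AND PROOFS =====

-- the common pure value: both the memoized recursion and the stack machine compute Fp
-- of the projected (count, type) lists
def proj (l : List (List Int)) : List (Int × Int) := l.map (fun g => (pvCnt g, pvTyp g))

def setHd (c : Int) : List (Int × Int) → List (Int × Int)
  | [] => []
  | p :: r => (c, p.2) :: r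

def compactP (P : List (Int × Int)) : List (Int × Int) :=
  if (P.headD (0, 0)).1 = 0 then P.tail else P

def Fp (P Q : List (Int × Int)) : Int :=
  if P.length = 0 ∨ Q.length = 0 then 0
  else
    if (P.headD (0, 0)).2 = (Q.headD (0, 0)).2 then
      let m := min (P.headD (0, 0)).1 (Q.headD (0, 0)).1
      m + Fp (compactP (setHd ((P.headD (0, 0)).1 - m) P)) (compactP (setHd ((Q.headD (0, 0)).1 - m) Q))
    else
      max (Fp P.tail Q) (Fp P Q.tail)
termination_by P.length + Q.length
decreasing_by
  · rcases P with _ | ⟨p, P⟩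
    · simp at *
    rcases Q with _ | ⟨q, Q⟩
    · simp at *
    simp only [setHd, compactP, List.headD_cons, List.tail_cons, List.length_cons]
    split_ifs <;> first
      | omega
      | (simp only [List.length_cons, List.length_tail] <;> omega)
  · simp only [List.length_tail] at *
    omega
  · simp only [List.length_tail] at *
    omega

def IsSub (P : List (Int × Int)) (bs : List (List Int)) : Prop :=
  bs.length ≤ P.length ∧ proj bs = setHd (pvCnt (bs.headD [])) (P.drop (P.length - bs.length))

def okA (P Q : List (Int × Int)) (M : PySem.Dict (List Int) Int) : Prop :=
  ∀ lb lt b0 t0 v, 1 ≤ lb → lb.toNat ≤ P.length → 1 ≤ lt → lt.toNat ≤ Q.length →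
    M.get? [lb, lt, b0, t0] = some v →
    v = Fp (setHd b0 (P.drop (P.length - lb.toNat))) (setHd t0 (Q.drop (Q.length - lt.toNat)))

-- the value of a machine state (i, j, bc, tc)
def FpS (boxes toys : List (List Int)) (s : Nat × Nat × Int × Int) : Int :=
  Fp (setHd s.2.2.1 ((proj boxes).drop s.1)) (setHd s.2.2.2 ((proj toys).drop s.2.1))

-- invariant of B's value table: every recorded value is the Fp value of its state
def okV (boxes toys : List (List Int)) (val : PySem.Dict (Nat × Nat × Int × Int) Int) : Prop :=
  ∀ s v, val.get? s = some v → v = FpS boxes toys s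

-- small facts about proj / setHd / compactP
theorem length_proj (l : List (List Int)) : (proj l).length = l.length := by
  simp [proj]

theorem proj_headD (l : List (List Int)) :
    (proj l).headD (0, 0) = (pvCnt (l.headD []), pvTyp (l.headD [])) := by
  cases l <;> simp [proj, pvCnt, pvTyp]

theorem proj_tail (l : List (List Int)) : (proj l).tail = proj l.tail := by
  cases l <;> simp [proj]

theorem setHd_proj_self (l : List (List Int)) :
    setHd (pvCnt (l.headD [])) (proj l) = proj l := by
  cases l <;> simp [proj, setHd]

theorem nxt_drop (boxes : List (List Int)) (k : Nat) :
    setHd (pvNxt boxes k) ((proj boxes).drop k) = (proj boxes).drop k := by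
  induction boxes generalizing k with
  | nil => simp [proj, setHd]
  | cons g l ih =>
    cases k with
    | zero => simp [proj, pvNxt, setHd]
    | succ k => simpa [proj, pvNxt] using ih k

theorem proj_drop_cons (boxes : List (List Int)) (i : Nat) (h : i < boxes.length) :
    (proj boxes).drop i
      = (pvCnt (boxes.getD i []), pvTyp (boxes.getD i [])) :: (proj boxes).drop (i + 1) := by
  induction boxes generalizing i with
  | nil => simp at h
  | cons g l ih =>
    cases i with
    | zero => simp [proj]
    | succ i => simpa [proj] using ih i (by simpa using h)

-- a key the ofList dictionary answers for is a key of the original association list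
theorem get?_ofList_mem_fst (l : List (List Int × Int)) (k : List Int) (v : Int)
    (h : (PySem.Dict.ofList l).get? k = some v) : k ∈ l.map Prod.fst := by
  have hk : k ∈ (PySem.Dict.ofList l).keys := by
    rw [← PySem.Dict.contains_iff_mem_keys, PySem.Dict.contains_eq_isSome_get?, h]
    rfl
  rw [PySem.Dict.ofList, PySem.Dict.update,
    PySem.Dict.keys_foldl_insert_key l Prod.fst (fun _ x => x.2)] at hk
  rcases (PySem.Set.mem_update _ _ _).mp hk with w | w
  · simp [PySem.Dict.keys_empty] at w
  · exact w

-- memo-validity is preserved by the inserts the A-side recursion performs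
theorem okA_insert {P Q : List (Int × Int)} {M : PySem.Dict (List Int) Int}
    {lb lt b0 t0 v : Int} (h : okA P Q M)
    (hv : v = Fp (setHd b0 (P.drop (P.length - lb.toNat)))
               (setHd t0 (Q.drop (Q.length - lt.toNat)))) :
    okA P Q (M.insert [lb, lt, b0, t0] v) := by
  intro lb' lt' b0' t0' v' hb1 hb2 hb3 hb4 hg
  rw [PySem.Dict.get?_insert] at hg
  split at hg
  · next heq =>
    simp only [List.cons.injEq, and_true] at heq
    obtain ⟨e1, e2, e3, e4⟩ := heq
    cases hg
    rw [e1, e2, e3, e4]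
    exact hv
  · exact h _ _ _ _ _ hb1 hb2 hb3 hb4 hg

-- table-validity is preserved by the inserts the B-side machine performs
theorem okV_insert {boxes toys : List (List Int)}
    {val : PySem.Dict (Nat × Nat × Int × Int) Int} {s : Nat × Nat × Int × Int} {v : Int}
    (h : okV boxes toys val) (hv : v = FpS boxes toys s) :
    okV boxes toys (val.insert s v) := by
  intro s' v' hg
  rw [PySem.Dict.get?_insert] at hg
  split at hg
  · next heq =>
    cases hg
    rw [heq]
    exact hv
  · exact h _ _ hg

-- inserting the (unique) Fp value of a state never changes an existing entry
theorem get?_mono_insert {boxes toys : List (List Int)}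
    {val : PySem.Dict (Nat × Nat × Int × Int) Int} {s : Nat × Nat × Int × Int} {v0 : Int}
    (hok : okV boxes toys val) (hv0 : v0 = FpS boxes toys s) :
    ∀ t v, val.get? t = some v → (val.insert s v0).get? t = some v := by
  intro t v h
  rw [PySem.Dict.get?_insert]
  split
  · next heq =>
    rw [heq] at h
    rw [hv0, ← hok _ _ h]
  · exact h

theorem IsSub_tail {P : List (Int × Int)} {bs : List (List Int)}
    (h : IsSub P bs) (hb : bs ≠ []) : IsSub P bs.tail := by
  obtain ⟨hlen, hproj⟩ := h
  have h1 : bs.length ≠ 0 := by simpa using fun w => hb (List.length_eq_zero_iff.mp w)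
  refine ⟨by simp [List.length_tail]; omega, ?_⟩
  rcases hP : P.drop (P.length - bs.length) with _ | ⟨p, rest⟩
  · exfalso
    have := congrArg List.length hP
    simp at this
    omega
  · have htl : proj bs.tail = rest := by
      rw [← proj_tail, hproj, hP]
      simp [setHd]
    have hdrop : P.drop (P.length - bs.tail.length) = rest := by
      have he : P.length - bs.tail.length = (P.length - bs.length) + 1 := by
        simp [List.length_tail]; omega
      rw [he, ← List.tail_drop, hP]
      rfl
    rw [hdrop, ← htl, setHd_proj_self]

theorem IsSub_rehead {P : List (Int × Int)} {bs : List (List Int)}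
    (h : IsSub P bs) (hb : bs ≠ []) (d : Int) :
    IsSub P ([d, pvTyp (bs.headD [])] :: bs.tail) := by
  obtain ⟨hlen, hproj⟩ := h
  have h1 : bs.length ≠ 0 := by simpa using fun w => hb (List.length_eq_zero_iff.mp w)
  have hlen2 : ([d, pvTyp (bs.headD [])] :: bs.tail).length = bs.length := by
    simp [List.length_tail]; omega
  refine ⟨by rw [hlen2]; exact hlen, ?_⟩
  rw [hlen2]
  rcases hP : P.drop (P.length - bs.length) with _ | ⟨p, rest⟩
  · exfalso
    have := congrArg List.length hP
    simp at this
    omega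
  · have hpt : proj bs = (pvCnt (bs.headD []), p.2) :: rest := by
      rw [hproj, hP]; rfl
    have hp2 : p.2 = pvTyp (bs.headD []) := by
      have h2 := proj_headD bs
      rw [hpt] at h2
      simpa using congrArg Prod.snd h2
    have htl : proj bs.tail = rest := by
      rw [← proj_tail, hpt, List.tail_cons]
    simp only [proj, List.map_cons, setHd]
    rw [← proj, htl, hp2]
    simp [pvCnt, pvTyp]

theorem Fp_zero {P Q : List (Int × Int)} (h : P = [] ∨ Q = []) : Fp P Q = 0 := by
  rw [Fp, if_pos]
  rcases h with h | h <;> simp [h]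

theorem Fp_match {P Q : List (Int × Int)} (hP : P ≠ []) (hQ : Q ≠ [])
    (hty : (P.headD (0, 0)).2 = (Q.headD (0, 0)).2) :
    Fp P Q = min (P.headD (0, 0)).1 (Q.headD (0, 0)).1
        + Fp (compactP (setHd ((P.headD (0, 0)).1 - min (P.headD (0, 0)).1 (Q.headD (0, 0)).1) P))
             (compactP (setHd ((Q.headD (0, 0)).1 - min (P.headD (0, 0)).1 (Q.headD (0, 0)).1) Q)) := by
  rw [Fp, if_neg (by simp [List.length_eq_zero_iff, hP, hQ]), if_pos hty]

theorem Fp_mismatch {P Q : List (Int × Int)} (hP : P ≠ []) (hQ : Q ≠ [])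
    (hty : ¬ (P.headD (0, 0)).2 = (Q.headD (0, 0)).2) :
    Fp P Q = max (Fp P.tail Q) (Fp P Q.tail) := by
  rw [Fp, if_neg (by simp [List.length_eq_zero_iff, hP, hQ]), if_neg hty]

theorem proj_compact (bs : List (List Int)) (hb : bs ≠ []) (d : Int) :
    proj (if pvCnt (([d, pvTyp (bs.headD [])] :: bs.tail).headD []) = 0
            then ([d, pvTyp (bs.headD [])] :: bs.tail).tail
            else ([d, pvTyp (bs.headD [])] :: bs.tail))
      = compactP (setHd d (proj bs)) := by
  rcases bs with _ | ⟨g, l⟩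
  · exact absurd rfl hb
  · simp only [proj, List.map_cons, setHd, compactP, List.headD_cons, List.tail_cons]
    split_ifs with h1 h2 <;> simp_all [pvCnt, pvTyp, proj]

-- the compact step in the matching branch can only shrink the pair of lists
theorem pvDecCompact (boxes toys : List (List Int))
    (h : ¬(boxes.length = 0 ∨ toys.length = 0)) (a b x y : Int) :
    (compactA ([a - min a b, x] :: boxes.tail) ([b - min a b, y] :: toys.tail)).1.length
      + (compactA ([a - min a b, x] :: boxes.tail) ([b - min a b, y] :: toys.tail)).2.length
      < boxes.length + toys.length := by
  simp only [compactA, pvCnt, List.headD_cons, List.getD_cons_zero, List.tail_cons]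
  split_ifs <;> first
    | omega
    | (simp only [List.length_cons, List.length_tail]; omega)

theorem solveGoA (P Q : List (Int × Int)) (fuel : Nat) :
    ∀ (bs ts : List (List Int)) (M : PySem.Dict (List Int) Int),
      bs.length + ts.length < fuel → IsSub P bs → IsSub Q ts → okA P Q M →
      (solveGo fuel bs ts M).1 = Fp (proj bs) (proj ts) ∧ okA P Q (solveGo fuel bs ts M).2 := by
  induction fuel with
  | zero =>
    intro bs ts M hf _ _ _
    exact absurd hf (Nat.not_lt_zero _)
  | succ fuel ih =>
    intro bs ts M hf hsb hst hok
    rw [solveGo]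
    by_cases h : bs.length = 0 ∨ ts.length = 0
    · rw [if_pos h]
      refine ⟨?_, hok⟩
      have h0 : proj bs = [] ∨ proj ts = [] := by
        rcases h with h | h
        · exact Or.inl (by rw [List.length_eq_zero_iff.mp h]; rfl)
        · exact Or.inr (by rw [List.length_eq_zero_iff.mp h]; rfl)
      rw [Fp_zero h0]
    · rw [if_neg h]
      rcases hM : M.get? [(bs.length : Int), (ts.length : Int),
          pvCnt (bs.headD []), pvCnt (ts.headD [])] with _ | v
      · simp only [hM]
        have hbne : bs ≠ [] := by
          intro w; exact h (Or.inl (by simp [w]))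
        have htne : ts ≠ [] := by
          intro w; exact h (Or.inr (by simp [w]))
        by_cases hty : pvTyp (bs.headD []) = pvTyp (ts.headD [])
        · rw [if_pos hty]
          have hsub1 : IsSub P (compactA
              ([pvCnt (bs.headD []) - min (pvCnt (bs.headD [])) (pvCnt (ts.headD [])), pvTyp (bs.headD [])] :: bs.tail)
              ([pvCnt (ts.headD []) - min (pvCnt (bs.headD [])) (pvCnt (ts.headD [])), pvTyp (ts.headD [])] :: ts.tail)).1 := by
            rw [compactA]
            dsimp only
            split_ifs with h1
            · simpa using IsSub_tail hsb hbne
            · exact IsSub_rehead hsb hbne _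
          have hsub2 : IsSub Q (compactA
              ([pvCnt (bs.headD []) - min (pvCnt (bs.headD [])) (pvCnt (ts.headD [])), pvTyp (bs.headD [])] :: bs.tail)
              ([pvCnt (ts.headD []) - min (pvCnt (bs.headD [])) (pvCnt (ts.headD [])), pvTyp (ts.headD [])] :: ts.tail)).2 := by
            rw [compactA]
            dsimp only
            split_ifs with h1
            · simpa using IsSub_tail hst htne
            · exact IsSub_rehead hst htne _
          have hflen := pvDecCompact bs ts h (pvCnt (bs.headD [])) (pvCnt (ts.headD []))
            (pvTyp (bs.headD [])) (pvTyp (ts.headD []))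
          obtain ⟨e, okr⟩ := ih _ _ M (by omega) hsub1 hsub2 hok
          have hfp : Fp (proj bs) (proj ts)
              = min (pvCnt (bs.headD [])) (pvCnt (ts.headD []))
                + Fp (proj (compactA
                    ([pvCnt (bs.headD []) - min (pvCnt (bs.headD [])) (pvCnt (ts.headD [])), pvTyp (bs.headD [])] :: bs.tail)
                    ([pvCnt (ts.headD []) - min (pvCnt (bs.headD [])) (pvCnt (ts.headD [])), pvTyp (ts.headD [])] :: ts.tail)).1)
                  (proj (compactA
                    ([pvCnt (bs.headD []) - min (pvCnt (bs.headD [])) (pvCnt (ts.headD [])), pvTyp (bs.headD [])] :: bs.tail)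
                    ([pvCnt (ts.headD []) - min (pvCnt (bs.headD [])) (pvCnt (ts.headD [])), pvTyp (ts.headD [])] :: ts.tail)).2) := by
            have hPne : proj bs ≠ [] := by
              rcases bs with _ | ⟨g, l⟩
              · exact absurd rfl hbne
              · simp [proj]
            have hQne : proj ts ≠ [] := by
              rcases ts with _ | ⟨g, l⟩
              · exact absurd rfl htne
              · simp [proj]
            rw [Fp_match hPne hQne (by rw [proj_headD, proj_headD]; exact hty)]
            rw [compactA]
            simp only [proj_headD]
            rw [← proj_compact bs hbne, ← proj_compact ts htne]
          constructor
          · dsimp only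
            rw [e, hfp]
          · dsimp only
            apply okA_insert okr
            simp only [Int.toNat_natCast]
            rw [← hsb.2, ← hst.2, hfp, e]
        · rw [if_neg hty]
          obtain ⟨e1, ok1⟩ := ih bs.tail ts M
            (by simp only [List.length_tail]; omega) (IsSub_tail hsb hbne) hst hok
          obtain ⟨e2, ok2⟩ := ih bs ts.tail _
            (by simp only [List.length_tail]; omega) hsb (IsSub_tail hst htne) ok1
          have hfp : Fp (proj bs) (proj ts)
              = max (Fp (proj bs.tail) (proj ts)) (Fp (proj bs) (proj ts.tail)) := by
            have hPne : proj bs ≠ [] := by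
              rcases bs with _ | ⟨g, l⟩
              · exact absurd rfl hbne
              · simp [proj]
            have hQne : proj ts ≠ [] := by
              rcases ts with _ | ⟨g, l⟩
              · exact absurd rfl htne
              · simp [proj]
            rw [Fp_mismatch hPne hQne (by rw [proj_headD, proj_headD]; exact hty),
              proj_tail, proj_tail]
          constructor
          · dsimp only
            rw [e1, e2, hfp]
          · dsimp only
            apply okA_insert ok2
            simp only [Int.toNat_natCast]
            rw [← hsb.2, ← hst.2, hfp, e1, e2]
      · simp only [hM]
        refine ⟨?_, hok⟩
        have hv := hok (bs.length : Int) (ts.length : Int)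
          (pvCnt (bs.headD [])) (pvCnt (ts.headD [])) v (by omega) (by simpa using hsb.1)
          (by omega) (by simpa using hst.1) hM
        simp only [Int.toNat_natCast] at hv
        rw [hv, ← hsb.2, ← hst.2]

-- B-side step equations: the Fp value of a state in terms of its successors
theorem FpS_done {boxes toys : List (List Int)} {i j : Nat} (bc tc : Int)
    (h : boxes.length ≤ i ∨ toys.length ≤ j) : FpS boxes toys (i, j, bc, tc) = 0 := by
  rw [FpS]
  apply Fp_zero
  rcases h with h | h
  · left
    rw [List.drop_eq_nil_of_le (by rw [length_proj]; omega)]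
    rfl
  · right
    rw [List.drop_eq_nil_of_le (by rw [length_proj]; omega)]
    rfl

-- an empty stack just returns the table
theorem runB_nil (boxes toys : List (List Int)) (k : Nat)
    (val : PySem.Dict (Nat × Nat × Int × Int) Int) : runB boxes toys k [] val = val := by
  cases k <;> rw [runB]

-- main B-side lemma: with fuel ≥ 3*4^ds (ds bounding the remaining depth of the state),
-- the machine fully evaluates an eval frame — it reaches the rest of the stack having
-- recorded the Fp value of the state, only extended the table, and kept it valid
theorem runB_eval (boxes toys : List (List Int)) (ds : Nat) :
    ∀ (i j : Nat) (bc tc : Int), (boxes.length - i) + (toys.length - j) ≤ ds →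
    ∀ (fuel : Nat) (rest : List PvFrame) (val : PySem.Dict (Nat × Nat × Int × Int) Int),
      okV boxes toys val → 3 * 4 ^ ds ≤ fuel →
      ∃ k val',
        runB boxes toys fuel (PvFrame.eval (i, j, bc, tc) :: rest) val
            = runB boxes toys k rest val'
        ∧ okV boxes toys val'
        ∧ (∀ t v, val.get? t = some v → val'.get? t = some v)
        ∧ (val'.get? (i, j, bc, tc)).isSome
        ∧ fuel ≤ k + 3 * 4 ^ ds := by
  induction ds using Nat.strong_induction_on with
  | _ ds ih =>
  intro i j bc tc hD fuel rest val hok hfuel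
  have hx : 0 < 4 ^ ds := Nat.pow_pos (by norm_num)
  obtain ⟨fuel, rfl⟩ : ∃ f, fuel = f + 1 := ⟨fuel - 1, by omega⟩
  rw [runB]
  by_cases hmem : (val.get? (i, j, bc, tc)).isSome
  · rw [if_pos hmem]
    exact ⟨fuel, val, rfl, hok, fun t v h => h, hmem, by omega⟩
  · rw [if_neg hmem]
    have hnone : val.get? (i, j, bc, tc) = none := by
      cases h : val.get? (i, j, bc, tc)
      · rfl
      · rw [h] at hmem; simp at hmem
    by_cases hend : boxes.length ≤ i ∨ toys.length ≤ j
    · rw [if_pos hend]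
      refine ⟨fuel, val.insert (i, j, bc, tc) 0, rfl,
        okV_insert hok (FpS_done bc tc hend).symm,
        get?_mono_insert hok (FpS_done bc tc hend).symm, ?_, by omega⟩
      rw [PySem.Dict.get?_insert_self]
      rfl
    · rw [if_neg hend]
      have hi : i < boxes.length := by omega
      have hj : j < toys.length := by omega
      have hds : 2 ≤ ds := by omega
      have h4 : 4 ^ ds = 4 * 4 ^ (ds - 1) := by
        conv_lhs => rw [show ds = (ds - 1) + 1 from by omega]
        rw [pow_succ]
        ring
      have hx1 : 0 < 4 ^ (ds - 1) := Nat.pow_pos (by norm_num)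
      have hdP := proj_drop_cons boxes i hi
      have hdQ := proj_drop_cons toys j hj
      by_cases hty : pvTyp (boxes.getD i []) = pvTyp (toys.getD j [])
      · rw [if_pos hty]
        have hg : (if bc < tc then bc else tc) = min bc tc := by split_ifs <;> omega
        simp only [hg]
        have hfp : Fp (setHd bc ((proj boxes).drop i)) (setHd tc ((proj toys).drop j))
            = min bc tc
              + Fp (if bc - min bc tc = 0 then (proj boxes).drop (i + 1)
                      else (bc - min bc tc, pvTyp (boxes.getD i [])) :: (proj boxes).drop (i + 1))
                   (if tc - min bc tc = 0 then (proj toys).drop (j + 1)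
                      else (tc - min bc tc, pvTyp (toys.getD j [])) :: (proj toys).drop (j + 1)) := by
          rw [hdP, hdQ,
            Fp_match (by simp [setHd]) (by simp [setHd]) (by simpa [setHd] using hty)]
          simp only [setHd, List.headD_cons, compactP, List.tail_cons]
        by_cases h00 : bc - min bc tc = 0 ∧ tc - min bc tc = 0
        · rw [if_pos h00]
          have hkey : FpS boxes toys (i, j, bc, tc)
              = min bc tc + FpS boxes toys (i + 1, j + 1, pvNxt boxes (i + 1), pvNxt toys (j + 1)) := by
            rw [FpS, FpS]
            dsimp only
            rw [nxt_drop, nxt_drop, hfp, if_pos h00.1, if_pos h00.2]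
          obtain ⟨k1, val1, e1, ok1, mono1, some1, hk1⟩ := ih (ds - 1) (by omega)
            (i + 1) (j + 1) (pvNxt boxes (i + 1)) (pvNxt toys (j + 1)) (by omega)
            fuel (PvFrame.add (i, j, bc, tc) (min bc tc)
              (i + 1, j + 1, pvNxt boxes (i + 1), pvNxt toys (j + 1)) :: rest) val hok (by omega)
          rw [e1]
          obtain ⟨k2, rfl⟩ : ∃ k2, k1 = k2 + 1 := ⟨k1 - 1, by omega⟩
          rw [runB]
          obtain ⟨vC, hvC⟩ := Option.isSome_iff_exists.mp some1
          have hvCv : ((val1.get? (i + 1, j + 1, pvNxt boxes (i + 1), pvNxt toys (j + 1))).getD 0)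
              = FpS boxes toys (i + 1, j + 1, pvNxt boxes (i + 1), pvNxt toys (j + 1)) := by
            rw [hvC, Option.getD_some]
            exact ok1 _ _ hvC
          have hval : min bc tc + (val1.get? (i + 1, j + 1, pvNxt boxes (i + 1), pvNxt toys (j + 1))).getD 0
              = FpS boxes toys (i, j, bc, tc) := by
            rw [hvCv, hkey]
          refine ⟨k2, _, rfl, okV_insert ok1 hval, ?_, ?_, by omega⟩
          · intro t v h
            exact get?_mono_insert ok1 hval t v (mono1 t v h)
          · rw [PySem.Dict.get?_insert_self]
            rfl
        · rw [if_neg h00]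
          by_cases h0b : bc - min bc tc = 0
          · rw [if_pos h0b]
            have hnt : ¬ tc - min bc tc = 0 := fun w => h00 ⟨h0b, w⟩
            have hkey : FpS boxes toys (i, j, bc, tc)
                = min bc tc + FpS boxes toys (i + 1, j, pvNxt boxes (i + 1), tc - min bc tc) := by
              rw [FpS, FpS]
              dsimp only
              rw [hfp, if_pos h0b, if_neg hnt, nxt_drop, hdQ]
              simp only [setHd]
            obtain ⟨k1, val1, e1, ok1, mono1, some1, hk1⟩ := ih (ds - 1) (by omega)
              (i + 1) j (pvNxt boxes (i + 1)) (tc - min bc tc) (by omega)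
              fuel (PvFrame.add (i, j, bc, tc) (min bc tc)
                (i + 1, j, pvNxt boxes (i + 1), tc - min bc tc) :: rest) val hok (by omega)
            rw [e1]
            obtain ⟨k2, rfl⟩ : ∃ k2, k1 = k2 + 1 := ⟨k1 - 1, by omega⟩
            rw [runB]
            obtain ⟨vC, hvC⟩ := Option.isSome_iff_exists.mp some1
            have hval : min bc tc + (val1.get? (i + 1, j, pvNxt boxes (i + 1), tc - min bc tc)).getD 0
                = FpS boxes toys (i, j, bc, tc) := by
              rw [hvC, Option.getD_some, ok1 _ _ hvC, hkey]
            refine ⟨k2, _, rfl, okV_insert ok1 hval, ?_, ?_, by omega⟩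
            · intro t v h
              exact get?_mono_insert ok1 hval t v (mono1 t v h)
            · rw [PySem.Dict.get?_insert_self]
              rfl
          · rw [if_neg h0b]
            have hkey : FpS boxes toys (i, j, bc, tc)
                = min bc tc + FpS boxes toys (i, j + 1, bc - min bc tc, pvNxt toys (j + 1)) := by
              rw [FpS, FpS]
              dsimp only
              have hnt : tc - min bc tc = 0 := by omega
              rw [hfp, if_neg h0b, if_pos hnt, nxt_drop, hdP]
              simp only [setHd]
            obtain ⟨k1, val1, e1, ok1, mono1, some1, hk1⟩ := ih (ds - 1) (by omega)
              i (j + 1) (bc - min bc tc) (pvNxt toys (j + 1)) (by omega)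
              fuel (PvFrame.add (i, j, bc, tc) (min bc tc)
                (i, j + 1, bc - min bc tc, pvNxt toys (j + 1)) :: rest) val hok (by omega)
            rw [e1]
            obtain ⟨k2, rfl⟩ : ∃ k2, k1 = k2 + 1 := ⟨k1 - 1, by omega⟩
            rw [runB]
            obtain ⟨vC, hvC⟩ := Option.isSome_iff_exists.mp some1
            have hval : min bc tc + (val1.get? (i, j + 1, bc - min bc tc, pvNxt toys (j + 1))).getD 0
                = FpS boxes toys (i, j, bc, tc) := by
              rw [hvC, Option.getD_some, ok1 _ _ hvC, hkey]
            refine ⟨k2, _, rfl, okV_insert ok1 hval, ?_, ?_, by omega⟩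
            · intro t v h
              exact get?_mono_insert ok1 hval t v (mono1 t v h)
            · rw [PySem.Dict.get?_insert_self]
              rfl
      · rw [if_neg hty]
        have hkey : FpS boxes toys (i, j, bc, tc)
            = max (FpS boxes toys (i + 1, j, pvNxt boxes (i + 1), tc))
                  (FpS boxes toys (i, j + 1, bc, pvNxt toys (j + 1))) := by
          rw [FpS, FpS, FpS]
          dsimp only
          have ht1 : (setHd bc ((proj boxes).drop i)).tail
              = setHd (pvNxt boxes (i + 1)) ((proj boxes).drop (i + 1)) := by
            rw [hdP, nxt_drop]
            rfl
          have ht2 : (setHd tc ((proj toys).drop j)).tail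
              = setHd (pvNxt toys (j + 1)) ((proj toys).drop (j + 1)) := by
            rw [hdQ, nxt_drop]
            rfl
          rw [Fp_mismatch (by rw [hdP]; simp [setHd]) (by rw [hdQ]; simp [setHd])
                (by rw [hdP, hdQ]; simpa [setHd] using hty),
            ht1, ht2]
        obtain ⟨k1, val1, e1, ok1, mono1, some1, hk1⟩ := ih (ds - 1) (by omega)
          i (j + 1) bc (pvNxt toys (j + 1)) (by omega)
          fuel (PvFrame.eval (i + 1, j, pvNxt boxes (i + 1), tc) ::
            PvFrame.max (i, j, bc, tc) (i + 1, j, pvNxt boxes (i + 1), tc)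
              (i, j + 1, bc, pvNxt toys (j + 1)) :: rest) val hok (by omega)
        rw [e1]
        obtain ⟨k2, val2, e2, ok2, mono2, some2, hk2⟩ := ih (ds - 1) (by omega)
          (i + 1) j (pvNxt boxes (i + 1)) tc (by omega)
          k1 (PvFrame.max (i, j, bc, tc) (i + 1, j, pvNxt boxes (i + 1), tc)
            (i, j + 1, bc, pvNxt toys (j + 1)) :: rest) val1 ok1 (by omega)
        rw [e2]
        obtain ⟨k3, rfl⟩ : ∃ k3, k2 = k3 + 1 := ⟨k2 - 1, by omega⟩
        rw [runB]
        obtain ⟨vb, hvb⟩ := Option.isSome_iff_exists.mp some1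
        obtain ⟨va, hva⟩ := Option.isSome_iff_exists.mp some2
        have hvb2 := mono2 _ _ hvb
        have hval : Max.max ((val2.get? (i + 1, j, pvNxt boxes (i + 1), tc)).getD 0)
              ((val2.get? (i, j + 1, bc, pvNxt toys (j + 1))).getD 0)
            = FpS boxes toys (i, j, bc, tc) := by
          rw [hva, hvb2, Option.getD_some, Option.getD_some,
            ok2 _ _ hva, ok2 _ _ hvb2, hkey]
        refine ⟨k3, _, rfl, okV_insert ok2 hval, ?_, ?_, by omega⟩
        · intro t v h
          exact get?_mono_insert ok2 hval t v (mono2 t v (mono1 t v h))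
        · rw [PySem.Dict.get?_insert_self]
          rfl

-- ===== VERDICT (by name: the statement is the Claim_ definition above) =====
theorem solve_spec : Claim_equal_solve := by
  intro boxes toys M _hdom hpre
  show solve boxes toys M = solve_alt boxes toys M
  by_cases hbe : boxes.length = 0 ∨ toys.length = 0
  · rw [solve, solve_alt, if_pos hbe, solveGo, if_pos hbe]
  · have hM : ∀ p ∈ M.getD ([] : List (List Int × Int)), p.1.length ≠ 4
        ∨ p.1.getD 0 0 < 1 ∨ (boxes.length : Int) < p.1.getD 0 0
        ∨ p.1.getD 1 0 < 1 ∨ (toys.length : Int) < p.1.getD 1 0 := by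
      rcases hpre with hb | ht | ⟨_wb, _wt, hM⟩
      · exact absurd (Or.inl (by simp [hb])) hbe
      · exact absurd (Or.inr (by simp [ht])) hbe
      · exact hM
    have hokA : okA (proj boxes) (proj toys) (PySem.Dict.ofList (M.getD [])) := by
      intro lb lt b0 t0 v hb1 hb2 hb3 hb4 hv
      exfalso
      have hk : [lb, lt, b0, t0] ∈ (M.getD ([] : List (List Int × Int))).map Prod.fst :=
        get?_ofList_mem_fst _ _ _ hv
      obtain ⟨p, hp, hpk⟩ := List.mem_map.mp hk
      rcases hM p hp with w | w | w | w | w <;> rw [hpk] at w <;>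
        simp only [length_proj, List.length_cons, List.length_nil, List.getD_cons_zero,
          List.getD_cons_succ] at *
      · exact w rfl
      · omega
      · omega
      · omega
      · omega
    have hokV : okV boxes toys PySem.Dict.empty := by
      intro s v hv
      rw [PySem.Dict.get?_empty] at hv
      exact absurd hv (by simp)
    have hsubP : IsSub (proj boxes) boxes := by
      refine ⟨by rw [length_proj], ?_⟩
      rw [length_proj, Nat.sub_self, List.drop_zero, setHd_proj_self]
    have hsubQ : IsSub (proj toys) toys := by
      refine ⟨by rw [length_proj], ?_⟩
      rw [length_proj, Nat.sub_self, List.drop_zero, setHd_proj_self]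
    obtain ⟨eA, -⟩ := solveGoA (proj boxes) (proj toys) (boxes.length + toys.length + 1)
      boxes toys (PySem.Dict.ofList (M.getD [])) (by omega) hsubP hsubQ hokA
    obtain ⟨k, val', eB, hokV', -, hsome, -⟩ := runB_eval boxes toys
      (boxes.length + toys.length) 0 0 (pvNxt boxes 0) (pvNxt toys 0) (by omega)
      (3 * 4 ^ (boxes.length + toys.length)) [] PySem.Dict.empty hokV (le_refl _)
    rw [runB_nil] at eB
    obtain ⟨v, hv⟩ := Option.isSome_iff_exists.mp hsome
    have hvv := hokV' _ _ hv
    rw [solve, solve_alt, if_neg hbe, eA, eB, hv]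
    simp only [Option.getD_some, hvv, FpS]
    rw [List.drop_zero, List.drop_zero,
      show setHd (pvNxt boxes 0) (proj boxes) = proj boxes from by simpa using nxt_drop boxes 0,
      show setHd (pvNxt toys 0) (proj toys) = proj toys from by simpa using nxt_drop toys 0]
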